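-- pv_equiv track=rewrite | github.com/Noya-G/Video2Mesh | chooseFrames.py | extract_unique_integers
-- ===== SOURCE A (Python) =====
-- def extract_unique_integers(tuples_list):
--     result = []
--
--     for i, (start, end, _) in enumerate(tuples_list):
--         # Always add the start if it's not already in the list
--         if not result or result[-1] != start:
--             result.append(start)
--
--         # Only add the end if it's not the start of the next tuple
--         if i == len(tuples_list) - 1 or end != tuples_list[i + 1][0]:
--             result.append(end)
--
--     return result
-- ===== SOURCE B (Python) =====
-- def extract_unique_integers(tuples_list):
--     if not tuples_list:
--         return []
--     # stage 1: materialise the tagged boundary stream; the look-ahead is resolved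
--     # by zipping the list with itself shifted by one (the last tuple keeps both bounds)
--     tagged = []
--     for (s, e, _), (ns, _ignored1, _ignored2) in zip(tuples_list, tuples_list[1:]):
--         tagged.append((s, True))
--         if e != ns:
--             tagged.append((e, False))
--     ls, le, _ = tuples_list[-1]
--     tagged.append((ls, True))
--     tagged.append((le, False))
--     # stage 2: collapse a start whose value repeats the previously kept boundary
--     out = []
--     for v, is_start in tagged:
--         if is_start and out and out[-1] == v:
--             continue
--         out.append(v)
--     return out
-- ===== Notes on version B (the rewrite author's own statement) =====
-- stated objective: alternative
-- what changed: Replaced A's single indexed loop (enumerate plus tuples_list[i+1] look-ahead and in-loop dedup) by two staged passes: first materialise a tagged boundary stream by zipping the list against itself shifted by one (dropping each end equal to the next start), then a separate collapse pass that drops a start repeating the previously kept boundary.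
import Mathlib
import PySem

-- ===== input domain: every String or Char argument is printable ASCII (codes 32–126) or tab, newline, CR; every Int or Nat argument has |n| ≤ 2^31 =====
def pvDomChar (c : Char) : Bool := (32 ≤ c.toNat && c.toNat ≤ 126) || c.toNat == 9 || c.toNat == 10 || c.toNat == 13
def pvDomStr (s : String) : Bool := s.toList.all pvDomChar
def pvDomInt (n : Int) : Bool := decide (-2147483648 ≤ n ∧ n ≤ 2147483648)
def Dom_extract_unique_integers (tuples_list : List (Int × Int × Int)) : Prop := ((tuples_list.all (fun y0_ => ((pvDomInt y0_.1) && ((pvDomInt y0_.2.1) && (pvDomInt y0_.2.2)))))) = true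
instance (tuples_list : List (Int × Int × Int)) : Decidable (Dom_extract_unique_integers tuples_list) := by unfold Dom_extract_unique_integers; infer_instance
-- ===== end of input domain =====

-- B replaces A's indexed single loop (enumerate + tuples_list[i+1] look-ahead) by two staged
-- passes: a zip-shifted pass materialising a tagged boundary stream, then a separate collapse
-- pass; objective: alternative decomposition, same cost.


-- ===== PORT A =====
-- loop body of A's for-loop; p = (i, (start, end, _))
def pvStepA (ts : List (Int × Int × Int)) (result : List Int) (p : Int × (Int × Int × Int)) : List Int :=
  let i := p.1
  let start := p.2.1
  let end_ := p.2.2.1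
  -- if not result or result[-1] != start: result.append(start)
  let result := if result = [] ∨ PySem.List.pyGet? result (-1) ≠ some start then result ++ [start] else result
  -- if i == len(tuples_list) - 1 or end != tuples_list[i + 1][0]: result.append(end)
  -- (the index i+1 is only consulted when i is not the last index, as in Python's short-circuit 'or')
  if i = (ts.length : Int) - 1 ∨ (PySem.List.pyGet? ts (i + 1)).map (·.1) ≠ some end_ then result ++ [end_] else result

def extract_unique_integers (tuples_list : List (Int × Int × Int)) : List Int :=
  (PySem.List.enumerate tuples_list 0).foldl (pvStepA tuples_list) []

-- ===== PORT B =====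
-- stage-1 loop body: p = ((start, end, _), (next_start, _, _)); appends the tagged start,
-- and the tagged end unless it equals the next tuple's start
def pvTagStep (acc : List (Int × Bool)) (p : (Int × Int × Int) × (Int × Int × Int)) : List (Int × Bool) :=
  let s := p.1.1
  let e := p.1.2.1
  let ns := p.2.1
  let acc := acc ++ [(s, true)]
  if e ≠ ns then acc ++ [(e, false)] else acc

-- stage-2 loop body: skip a start whose value equals the previously kept boundary
def pvColStep (out : List Int) (p : Int × Bool) : List Int :=
  if p.2 = true ∧ out ≠ [] ∧ PySem.List.pyGet? out (-1) = some p.1 then out else out ++ [p.1]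

def extract_unique_integers_alt (tuples_list : List (Int × Int × Int)) : List Int :=
  match tuples_list with
  | [] => []
  | t :: rest =>
    -- zip(tuples_list, tuples_list[1:])
    let tagged := ((t :: rest).zip rest).foldl pvTagStep []
    -- tuples_list[-1], then append (ls, True), (le, False)
    let l := (t :: rest).getLast (List.cons_ne_nil t rest)
    let tagged := tagged ++ [(l.1, true), (l.2.1, false)]
    tagged.foldl pvColStep []

-- ===== PRECONDITION & SPEC =====
def Spec_extract_unique_integers (tuples_list : List (Int × Int × Int)) (out : List Int) : Prop := out = extract_unique_integers_alt tuples_list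
instance (tuples_list : List (Int × Int × Int)) (out : List Int) : Decidable (Spec_extract_unique_integers tuples_list out) := by unfold Spec_extract_unique_integers; infer_instance

-- ===== CLAIM (what is proved, stated in full; the proofs are below) =====
def Claim_equal_extract_unique_integers : Prop := ∀ (tuples_list : List (Int × Int × Int)), Dom_extract_unique_integers tuples_list → Spec_extract_unique_integers tuples_list (extract_unique_integers tuples_list)

-- ===== LEMMAS AND PROOFS =====

-- appending start with the last-element dedup guard (A's first branch)
def pvApp (result : List Int) (s : Int) : List Int :=
  if result = [] ∨ PySem.List.pyGet? result (-1) ≠ some s then result ++ [s] else result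

-- A's loop re-expressed on the remaining suffix (indices eliminated; proved equal in pvBridgeA)
def pvGoA : List Int → List (Int × Int × Int) → List Int
  | res, [] => res
  | res, t :: rest =>
      pvGoA (if rest = [] ∨ rest.head?.map (·.1) ≠ some t.2.1 then pvApp res t.1 ++ [t.2.1]
             else pvApp res t.1) rest

-- the tagged boundary stream of B's stage 1, written as a structural recursion
def pvTag : (Int × Int × Int) → List (Int × Int × Int) → List (Int × Bool)
  | t, [] => [(t.1, true), (t.2.1, false)]
  | t, t2 :: r => (t.1, true) :: ((if t.2.1 ≠ t2.1 then [(t.2.1, false)] else []) ++ pvTag t2 r)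

theorem pvBridgeA (ts : List (Int × Int × Int)) :
    ∀ (suffix : List (Int × Int × Int)) (j : Nat) (res : List Int),
      ts.drop j = suffix → j + suffix.length = ts.length →
      (PySem.List.enumerate suffix (j : Int)).foldl (pvStepA ts) res = pvGoA res suffix := by
  intro suffix
  induction suffix with
  | nil => intro j res _ _; simp [PySem.List.enumerate, pvGoA]
  | cons t rest ih =>
    intro j res hdrop hlen
    have hlast : ((j : Int) = (ts.length : Int) - 1) ↔ rest = [] := by
      constructor
      · intro h
        have hz : rest.length = 0 := by
          simp only [List.length_cons] at hlen; omega
        exact List.length_eq_zero_iff.mp hz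
      · intro h
        subst h
        simp only [List.length_cons, List.length_nil] at hlen
        omega
    have hnext : PySem.List.pyGet? ts ((j : Int) + 1) = rest.head? := by
      have hc : ((j : Int) + 1) = ((j + 1 : Nat) : Int) := by push_cast; ring
      rw [hc, PySem.List.pyGet?_natCast]
      have h2 : (ts.drop j)[1]? = ts[j + 1]? := List.getElem?_drop ..
      rw [← h2, hdrop]
      cases rest <;> simp
    have hstep : pvStepA ts res ((j : Int), t) =
        (if rest = [] ∨ rest.head?.map (·.1) ≠ some t.2.1 then pvApp res t.1 ++ [t.2.1]
         else pvApp res t.1) := by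
      simp only [pvStepA, pvApp, hlast, hnext]
    have hdrop' : ts.drop (j + 1) = rest := by
      have hd : ts.drop (j + 1) = (ts.drop j).drop 1 := by
        rw [List.drop_drop]
      rw [hd, hdrop, List.drop_one, List.tail_cons]
    have hlen' : (j + 1) + rest.length = ts.length := by
      simp only [List.length_cons] at hlen; omega
    have hcast : ((j : Int) + 1) = ((j + 1 : Nat) : Int) := by push_cast; ring
    rw [PySem.List.enumerate_cons, List.foldl_cons, hstep, hcast,
        ih (j + 1) _ hdrop' hlen', pvGoA]

-- B's stage-1 foldl over the zipped list, plus the final pair, builds exactly pvTag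
theorem pvTagF : ∀ (rest : List (Int × Int × Int)) (t : Int × Int × Int)
    (acc : List (Int × Bool)) (h : t :: rest ≠ []),
    ((t :: rest).zip rest).foldl pvTagStep acc ++
      [(((t :: rest).getLast h).1, true), (((t :: rest).getLast h).2.1, false)] =
    acc ++ pvTag t rest := by
  intro rest
  induction rest with
  | nil => intro t acc h; simp [pvTag]
  | cons t2 r ih =>
    intro t acc h
    have hz : (t :: t2 :: r).zip (t2 :: r) = (t, t2) :: ((t2 :: r).zip r) := by
      simp [List.zip_cons_cons]
    have hl : (t :: t2 :: r).getLast h = (t2 :: r).getLast (List.cons_ne_nil t2 r) :=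
      List.getLast_cons _
    rw [hz, List.foldl_cons, hl, ih t2 _ (List.cons_ne_nil t2 r)]
    by_cases he : t.2.1 ≠ t2.1
    · simp [pvTagStep, pvTag, he]
    · simp [pvTagStep, pvTag, he]

-- collapse step on a start is A's dedup append; on an end it is a plain append
theorem pvCol_start (out : List Int) (v : Int) : pvColStep out (v, true) = pvApp out v := by
  simp only [pvColStep, pvApp]
  by_cases h1 : out = []
  · simp [h1]
  · by_cases h2 : PySem.List.pyGet? out (-1) = some v
    · simp [h1, h2]
    · simp [h1, h2]

theorem pvCol_end (out : List Int) (v : Int) : pvColStep out (v, false) = out ++ [v] := by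
  simp [pvColStep]

-- folding the collapse over the tagged stream is exactly A's suffix loop
theorem pvGoA_tag : ∀ (rest : List (Int × Int × Int)) (t : Int × Int × Int) (res : List Int),
    pvGoA res (t :: rest) = (pvTag t rest).foldl pvColStep res := by
  intro rest
  induction rest with
  | nil =>
    intro t res
    simp [pvGoA, pvTag, pvCol_start, pvCol_end]
  | cons t2 r ih =>
    intro t res
    have hcond : ((t2 :: r).head?.map (·.1) ≠ some t.2.1) ↔ (t.2.1 ≠ t2.1) := by
      simp [eq_comm]
    by_cases he : t.2.1 ≠ t2.1
    · have : pvGoA res (t :: t2 :: r) = pvGoA (pvApp res t.1 ++ [t.2.1]) (t2 :: r) := by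
        rw [pvGoA, if_pos (Or.inr (hcond.mpr he))]
      rw [this, ih]
      simp [pvTag, he, pvCol_start, pvCol_end]
    · have : pvGoA res (t :: t2 :: r) = pvGoA (pvApp res t.1) (t2 :: r) := by
        rw [pvGoA, if_neg]
        simp only [hcond]
        rintro (h | h)
        · exact List.cons_ne_nil t2 r h
        · exact he h
      rw [this, ih]
      simp [pvTag, he, pvCol_start]

theorem pv_main (ts : List (Int × Int × Int)) :
    extract_unique_integers ts = extract_unique_integers_alt ts := by
  cases ts with
  | nil =>
    simp [extract_unique_integers, extract_unique_integers_alt, PySem.List.enumerate]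
  | cons t rest =>
    have hA : extract_unique_integers (t :: rest) = pvGoA [] (t :: rest) := by
      unfold extract_unique_integers
      have hb := pvBridgeA (t :: rest) (t :: rest) 0 [] (by simp) (by simp)
      simpa using hb
    have hT := pvTagF rest t [] (List.cons_ne_nil t rest)
    have hB : extract_unique_integers_alt (t :: rest) = (pvTag t rest).foldl pvColStep [] := by
      unfold extract_unique_integers_alt
      simp only []
      rw [show ((t :: rest).zip rest).foldl pvTagStep [] ++
            [(((t :: rest).getLast (List.cons_ne_nil t rest)).1, true),
             (((t :: rest).getLast (List.cons_ne_nil t rest)).2.1, false)] =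
          [] ++ pvTag t rest from hT]
      simp
    rw [hA, hB, pvGoA_tag]

-- ===== VERDICT (by name: the statement is the Claim_ definition above) =====
theorem extract_unique_integers_spec : Claim_equal_extract_unique_integers := by
  intro ts _
  unfold Spec_extract_unique_integers
  exact pv_main ts
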